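-- pv_equiv track=rewrite | github.com/jules-richemont/Algorithmic | ProjetFinal.py | coupure
-- ===== SOURCE A (Python) =====
-- c_del = 2
--
-- c_ins = 2
--
-- def c_sub(a,b):
--     if(a==b):
--         return 0
--     elif a == "A" and b == "T" or a == "T" and b == "A":
--         return 3
--     elif a == "C" and b == "G" or a == "G" and b == "C":
--         return 3
--     else:
--         return 4
--
-- def coupure(x,y):
--     n = len(x)
--     m = len(y)
--     # Initialisation de deux tableaux T et I de dimensions 2*m
--     T= [[0 for i in range(m+1)] for j in range(2)]
--     I= [[0 for i in range(m+1)] for j in range(2)]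
--     coupe = n//2
--     cmp = 0
--     i1 = 1
--     i2 = 1
--     for j in range(m+1) :
--         T[0][j] = j*c_ins
--     T[1][0] = c_del #insertion dans y
--     for j in range(m+1):
--         I[0][j] = j
--         I[1][j] = j
--
--     while cmp < n :
--         for j in range(1,m+1) :
--             T[i1][j] = min(T[(i1-1)%2][j]+c_del , T[i1][j-1]+c_ins,T[(i1-1)%2][j-1]+ c_sub(x[cmp],y[j-1]))
--             if cmp >= coupe :
--                 if T[i1][j]==T[(i1-1)%2][j]+c_del:
--                     I[i2][j] = I[(i2-1)%2][j]
--                 if T[i1][j]==T[i1][j-1]+c_ins :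
--                     I[i2][j] = I[i2][j-1]
--                 if T[i1][j] == T[(i1-1)%2][j-1]+c_sub(x[cmp], y[j-1]) :
--                     I[i2][j] = I[(i2-1)%2][j-1]
--
--         if cmp >= coupe :
--             i2 = (i2+1)%2
--         i1 = (i1+1)%2
--         T[i1][0] = T[(i1-1)%(2)][0]+ 2
--         cmp += 1
--
--     if (n-coupe)%2 == 0 :
--         return I[0][m]
--     return I[1][m]
-- ===== SOURCE B (Python) =====
-- c_del = 2
--
-- c_ins = 2
--
-- def c_sub(a, b):
--     if a == b:
--         return 0
--     elif a == "A" and b == "T" or a == "T" and b == "A":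
--         return 3
--     elif a == "C" and b == "G" or a == "G" and b == "C":
--         return 3
--     else:
--         return 4
--
-- def coupure(x, y):
--     # B: build the full (n+1)x(m+1) cost table, then backtrack one optimal
--     # alignment path from (n, m), recording the column where it reaches row n//2.
--     n = len(x)
--     m = len(y)
--     coupe = n // 2
--     T = [[j * c_ins for j in range(m + 1)]]
--     for i in range(1, n + 1):
--         prev = T[i - 1]
--         row = [i * c_del]
--         for j in range(1, m + 1):
--             row.append(min(prev[j] + c_del, row[j - 1] + c_ins,
--                            prev[j - 1] + c_sub(x[i - 1], y[j - 1])))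
--         T.append(row)
--     # backtrack; tie preference: substitution, then insertion, then deletion
--     i, j = n, m
--     while i > coupe:
--         if j >= 1 and T[i][j] == T[i - 1][j - 1] + c_sub(x[i - 1], y[j - 1]):
--             i, j = i - 1, j - 1
--         elif j >= 1 and T[i][j] == T[i][j - 1] + c_ins:
--             j = j - 1
--         else:
--             i = i - 1
--     return j
-- ===== Notes on version B (the rewrite author's own statement) =====
-- stated objective: alternative
-- what changed: A interleaves a rolling two-row cost table with forward propagation of the middle-row crossing column through a second two-row index table; B builds the full (n+1)x(m+1) cost table once and then backtracks a single optimal alignment path from (n,m), with the same tie preference (substitution > insertion > deletion), reading off the column where the path reaches row n//2.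
import Mathlib
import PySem

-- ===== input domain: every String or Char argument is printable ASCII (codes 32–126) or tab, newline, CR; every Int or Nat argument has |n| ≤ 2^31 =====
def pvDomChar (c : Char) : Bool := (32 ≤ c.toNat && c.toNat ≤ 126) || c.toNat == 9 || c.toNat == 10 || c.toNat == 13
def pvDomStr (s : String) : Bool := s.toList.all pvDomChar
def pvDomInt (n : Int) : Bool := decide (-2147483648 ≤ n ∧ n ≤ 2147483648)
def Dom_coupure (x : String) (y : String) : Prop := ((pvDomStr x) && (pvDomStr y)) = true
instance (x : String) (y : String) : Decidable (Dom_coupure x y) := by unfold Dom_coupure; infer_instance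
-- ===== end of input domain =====

-- B replaces A's rolling two-row DP with crossing-point propagation by a full
-- cost table plus an explicit backtrack of one optimal path (alternative
-- decomposition; same asymptotic cost).

-- ===== PORT A =====
-- shared module constants/helper (c_del, c_ins, c_sub)
def cdel : Int := 2
def cins : Int := 2
def csub (a b : Char) : Int :=
  if a = b then 0
  else if (a = 'A' ∧ b = 'T') ∨ (a = 'T' ∧ b = 'A') then 3
  else if (a = 'C' ∧ b = 'G') ∨ (a = 'G' ∧ b = 'C') then 3
  else 4

-- list-of-lists indexing/assignment, as Python's T[i][j] (indices always in range here)
def tget (t : List (List Int)) (i : Int) (j : Nat) : Int := (t.getD i.toNat []).getD j 0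
def tset (t : List (List Int)) (i : Int) (j : Nat) (v : Int) : List (List Int) :=
  t.set i.toNat ((t.getD i.toNat []).set j v)

-- body of A's inner `for j in range(1, m+1)` loop (state: the two tables T, I)
def aStepJ (xs ys : List Char) (coupe cmp : Nat) (i1 i2 : Int)
    (st : List (List Int) × List (List Int)) (j : Nat) :
    List (List Int) × List (List Int) :=
  let T := st.1
  let I := st.2
  -- x[cmp] and y[j-1] are always in range when A evaluates them
  let sub := csub (xs.getD cmp 'A') (ys.getD (j - 1) 'A')
  let T := tset T i1 j (min (min (tget T (PySem.Int.mod (i1 - 1) 2) j + cdel)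
                                 (tget T i1 (j - 1) + cins))
                           (tget T (PySem.Int.mod (i1 - 1) 2) (j - 1) + sub))
  let I :=
    if coupe ≤ cmp then
      let I := if tget T i1 j = tget T (PySem.Int.mod (i1 - 1) 2) j + cdel then
                 tset I i2 j (tget I (PySem.Int.mod (i2 - 1) 2) j) else I
      let I := if tget T i1 j = tget T i1 (j - 1) + cins then
                 tset I i2 j (tget I i2 (j - 1)) else I
      let I := if tget T i1 j = tget T (PySem.Int.mod (i1 - 1) 2) (j - 1) + sub then
                 tset I i2 j (tget I (PySem.Int.mod (i2 - 1) 2) (j - 1)) else I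
      I
    else I
  (T, I)

-- body of A's `while cmp < n` loop (state: T, I, i1, i2; cmp is the loop counter)
def aStep (xs ys : List Char) (coupe : Nat)
    (st : List (List Int) × List (List Int) × Int × Int) (cmp : Nat) :
    List (List Int) × List (List Int) × Int × Int :=
  let T := st.1
  let I := st.2.1
  let i1 := st.2.2.1
  let i2 := st.2.2.2
  let TI := (List.range' 1 ys.length).foldl (aStepJ xs ys coupe cmp i1 i2) (T, I)
  let T := TI.1
  let I := TI.2
  let i2 := if coupe ≤ cmp then PySem.Int.mod (i2 + 1) 2 else i2
  let i1 := PySem.Int.mod (i1 + 1) 2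
  let T := tset T i1 0 (tget T (PySem.Int.mod (i1 - 1) 2) 0 + 2)
  (T, I, i1, i2)

def coupure (x : String) (y : String) : Int :=
  let xs := x.toList
  let ys := y.toList
  let n := xs.length
  let m := ys.length
  let T : List (List Int) := [List.replicate (m + 1) 0, List.replicate (m + 1) 0]
  let I : List (List Int) := [List.replicate (m + 1) 0, List.replicate (m + 1) 0]
  let coupe := n / 2
  let T := (List.range (m + 1)).foldl (fun T j => tset T 0 j ((j : Int) * cins)) T
  let T := tset T 1 0 cdel
  let I := (List.range (m + 1)).foldl (fun I j => tset (tset I 0 j (j : Int)) 1 j (j : Int)) I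
  let st := (List.range n).foldl (aStep xs ys coupe) (T, I, (1 : Int), (1 : Int))
  let I := st.2.1
  if (n - coupe) % 2 = 0 then tget I 0 m else tget I 1 m

-- ===== PORT B =====
-- one DP row of B's table (Source B's inner append loop)
def bRow (xs ys : List Char) (prev : List Int) (i : Nat) : List Int :=
  (List.range' 1 ys.length).foldl
    (fun row j =>
      row ++ [min (min (prev.getD j 0 + cdel) (row.getD (j - 1) 0 + cins))
                  (prev.getD (j - 1) 0 + csub (xs.getD (i - 1) 'A') (ys.getD (j - 1) 'A'))])
    [(i : Int) * cdel]

-- Source B's backtrack while-loop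
def bBack (xs ys : List Char) (coupe : Nat) (t : List (List Int)) (i j : Nat) : Int :=
  if _h : i ≤ coupe then (j : Int)
  else if _h2 : 1 ≤ j ∧ (t.getD i []).getD j 0 =
        (t.getD (i - 1) []).getD (j - 1) 0 + csub (xs.getD (i - 1) 'A') (ys.getD (j - 1) 'A') then
    bBack xs ys coupe t (i - 1) (j - 1)
  else if _h3 : 1 ≤ j ∧ (t.getD i []).getD j 0 = (t.getD i []).getD (j - 1) 0 + cins then
    bBack xs ys coupe t i (j - 1)
  else
    bBack xs ys coupe t (i - 1) j
termination_by i + j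
decreasing_by all_goals omega

def coupure_alt (x : String) (y : String) : Int :=
  let xs := x.toList
  let ys := y.toList
  let n := xs.length
  let m := ys.length
  let coupe := n / 2
  let t := (List.range' 1 n).foldl
    (fun t i => t ++ [bRow xs ys (t.getD (i - 1) []) i])
    [(List.range (m + 1)).map (fun j : Nat => (j : Int) * cins)]
  bBack xs ys coupe t n m

-- ===== PRECONDITION & SPEC =====
def Spec_coupure (x : String) (y : String) (out : Int) : Prop := out = coupure_alt x y
instance (x : String) (y : String) (out : Int) : Decidable (Spec_coupure x y out) := by unfold Spec_coupure; infer_instance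

-- ===== CLAIM (what is proved, stated in full; the proofs are below) =====
def Claim_equal_coupure : Prop := ∀ (x : String) (y : String), Dom_coupure x y → Spec_coupure x y (coupure x y)

-- ===== LEMMAS AND PROOFS =====

-- the mathematical DP table: dT i j = minimal alignment cost of x[0:i], y[0:j]
def dT (xs ys : List Char) : Nat → Nat → Int
  | 0, j => (j : Int) * 2
  | i+1, 0 => ((i : Int) + 1) * 2
  | i+1, j+1 =>
      min (min (dT xs ys i (j+1) + 2) (dT xs ys (i+1) j + 2))
          (dT xs ys i j + csub (xs.getD i 'A') (ys.getD j 'A'))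

-- the crossing column of the preferred optimal path (ties: sub > ins > del)
def cross (xs ys : List Char) (coupe : Nat) (i j : Nat) : Int :=
  if _h : i ≤ coupe then (j : Int)
  else if _h2 : 1 ≤ j ∧ dT xs ys i j =
      dT xs ys (i-1) (j-1) + csub (xs.getD (i-1) 'A') (ys.getD (j-1) 'A') then
    cross xs ys coupe (i-1) (j-1)
  else if _h3 : 1 ≤ j ∧ dT xs ys i j = dT xs ys i (j-1) + 2 then
    cross xs ys coupe i (j-1)
  else cross xs ys coupe (i-1) j
termination_by i + j
decreasing_by all_goals omega

lemma dT_zero (xs ys : List Char) (i : Nat) : dT xs ys i 0 = (i : Int) * 2 := by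
  cases i with
  | zero => simp [dT]
  | succ k => simp [dT]

lemma cross_base (xs ys : List Char) (coupe i j : Nat) (h : i ≤ coupe) :
    cross xs ys coupe i j = (j : Int) := by
  rw [cross]; simp [h]

lemma cross_zero (xs ys : List Char) (coupe : Nat) : ∀ i, cross xs ys coupe i 0 = 0 := by
  intro i
  induction i using Nat.strong_induction_on with
  | _ i ih =>
    rw [cross]
    split_ifs with h1 h2 h3
    · simp
    · exact absurd h2.1 (by omega)
    · exact absurd h3.1 (by omega)
    · exact ih (i-1) (by omega)

lemma getD_set_self (l : List Int) (i : Nat) (v : Int) (h : i < l.length) :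
    (l.set i v).getD i 0 = v := by
  rw [List.getD_eq_getElem?_getD, List.getElem?_set_self h]; rfl

lemma getD_set_ne (l : List Int) (i k : Nat) (v : Int) (h : i ≠ k) :
    (l.set i v).getD k 0 = l.getD k 0 := by
  rw [List.getD_eq_getElem?_getD, List.getElem?_set_ne h, ← List.getD_eq_getElem?_getD]

lemma getD_map_range {α : Type} (f : Nat → α) (d : α) (M j : Nat) (h : j < M) :
    ((List.range M).map f).getD j d = f j := by
  rw [List.getD_eq_getElem?_getD]
  simp [h]

-- ===== B side =====

-- row i of the DP table as a list
def rowSpec (xs ys : List Char) (i : Nat) : List Int :=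
  (List.range (ys.length + 1)).map (fun j => dT xs ys i j)

lemma bRow_spec (xs ys : List Char) (i : Nat) :
    bRow xs ys (rowSpec xs ys i) (i+1) = rowSpec xs ys (i+1) := by
  have aux : ∀ k, k ≤ ys.length →
      (List.range' 1 k).foldl
        (fun row j =>
          row ++ [min (min ((rowSpec xs ys i).getD j 0 + cdel) (row.getD (j - 1) 0 + cins))
                      ((rowSpec xs ys i).getD (j - 1) 0 +
                        csub (xs.getD (i + 1 - 1) 'A') (ys.getD (j - 1) 'A'))])
        [((i + 1 : Nat) : Int) * cdel]
      = (List.range (k+1)).map (fun j => dT xs ys (i+1) j) := by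
    intro k
    induction k with
    | zero =>
      intro _
      simp [dT, cdel]
    | succ k ih =>
      intro hk
      rw [List.range'_concat, List.foldl_append, ih (by omega), List.foldl_cons, List.foldl_nil]
      have h1 : 1 + 1 * k = k + 1 := by omega
      rw [h1]
      have e1 : (rowSpec xs ys i).getD (k+1) 0 = dT xs ys i (k+1) := by
        unfold rowSpec; exact getD_map_range _ _ _ _ (by omega)
      have e2 : ((List.range (k+1)).map (fun j => dT xs ys (i+1) j)).getD (k+1-1) 0
          = dT xs ys (i+1) k := by
        have : k + 1 - 1 = k := by omega
        rw [this]; exact getD_map_range _ _ _ _ (by omega)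
      have e3 : (rowSpec xs ys i).getD (k+1-1) 0 = dT xs ys i k := by
        have : k + 1 - 1 = k := by omega
        rw [this]; unfold rowSpec; exact getD_map_range _ _ _ _ (by omega)
      rw [e1, e2, e3]
      have e4 : i + 1 - 1 = i := by omega
      have e5 : k + 1 - 1 = k := by omega
      rw [e4, e5, List.range_succ (n := k+1), List.map_append]
      simp [dT, cdel, cins]
  unfold bRow rowSpec
  exact aux ys.length le_rfl

lemma tabB_spec (xs ys : List Char) : ∀ t : Nat,
    (List.range' 1 t).foldl (fun acc i => acc ++ [bRow xs ys (acc.getD (i - 1) []) i])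
      [(List.range (ys.length + 1)).map (fun j : Nat => (j : Int) * cins)]
    = (List.range (t+1)).map (fun i => rowSpec xs ys i) := by
  intro t
  induction t with
  | zero =>
    simp only [List.range'_zero, List.foldl_nil]
    congr 1
    unfold rowSpec
    apply List.map_congr_left
    intro a _
    simp [dT, cins]
  | succ t ih =>
    rw [List.range'_concat, List.foldl_append, ih, List.foldl_cons, List.foldl_nil]
    have h1 : 1 + 1 * t = t + 1 := by omega
    rw [h1]
    have e1 : ((List.range (t+1)).map (fun i => rowSpec xs ys i)).getD (t+1-1) []
        = rowSpec xs ys t := by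
      have : t + 1 - 1 = t := by omega
      rw [this]; exact getD_map_range _ _ _ _ (by omega)
    rw [e1, bRow_spec, List.range_succ (n := t+1), List.map_append]
    simp

lemma bBack_eq (xs ys : List Char) (coupe N : Nat) (t : List (List Int))
    (ht : ∀ i j, i ≤ N → j ≤ ys.length → (t.getD i []).getD j 0 = dT xs ys i j) :
    ∀ s i j, i + j ≤ s → i ≤ N → j ≤ ys.length →
      bBack xs ys coupe t i j = cross xs ys coupe i j := by
  intro s
  induction s with
  | zero =>
    intro i j hs hi hj
    have hi0 : i = 0 := by omega
    have hc : i ≤ coupe := by omega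
    rw [bBack, cross]
    simp [hc]
  | succ s ih =>
    intro i j hs hi hj
    rw [bBack, cross]
    by_cases hc : i ≤ coupe
    · simp [hc]
    · have e0 : (t.getD i []).getD j 0 = dT xs ys i j := ht _ _ hi hj
      have e1 : (t.getD (i-1) []).getD (j-1) 0 = dT xs ys (i-1) (j-1) :=
        ht _ _ (by omega) (by omega)
      have e2 : (t.getD i []).getD (j-1) 0 = dT xs ys i (j-1) := ht _ _ hi (by omega)
      simp only [hc, e0, e1, e2, dite_false, cins]
      split_ifs with h2 h3
      · exact ih _ _ (by omega) (by omega) (by omega)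
      · exact ih _ _ (by omega) (by omega) (by omega)
      · exact ih _ _ (by omega) (by omega) (by omega)

-- ===== A side =====

-- a two-row table whose row `r` is `cur` and row `1-r` is `prev`
def mk2 (r : Int) (cur prev : List Int) : List (List Int) :=
  if r = 0 then [cur, prev] else [prev, cur]

lemma mod_prev (r : Int) (hr : r = 0 ∨ r = 1) : PySem.Int.mod (r - 1) 2 = 1 - r := by
  rcases hr with rfl | rfl <;> decide

lemma mod_next (r : Int) (hr : r = 0 ∨ r = 1) : PySem.Int.mod (r + 1) 2 = 1 - r := by
  rcases hr with rfl | rfl <;> decide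

lemma tget_mk2_cur (r : Int) (hr : r = 0 ∨ r = 1) (cur prev : List Int) (j : Nat) :
    tget (mk2 r cur prev) r j = cur.getD j 0 := by
  rcases hr with rfl | rfl <;> simp [mk2, tget]

lemma tget_mk2_prev (r : Int) (hr : r = 0 ∨ r = 1) (cur prev : List Int) (j : Nat) :
    tget (mk2 r cur prev) (1 - r) j = prev.getD j 0 := by
  rcases hr with rfl | rfl <;> simp [mk2, tget]

lemma tset_mk2_cur (r : Int) (hr : r = 0 ∨ r = 1) (cur prev : List Int) (j : Nat) (v : Int) :
    tset (mk2 r cur prev) r j v = mk2 r (cur.set j v) prev := by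
  rcases hr with rfl | rfl <;> simp [mk2, tset]

lemma mk2_swap (r : Int) (hr : r = 0 ∨ r = 1) (cur prev : List Int) :
    mk2 r cur prev = mk2 (1 - r) prev cur := by
  rcases hr with rfl | rfl <;> simp [mk2]

-- the value A writes into T[i1][j] at column j = jd+1
def vA (xs ys : List Char) (k : Nat) (ct pt : List Int) (jd : Nat) : Int :=
  min (min (pt.getD (jd+1) 0 + 2) (ct.getD jd 0 + 2))
      (pt.getD jd 0 + csub (xs.getD k 'A') (ys.getD jd 'A'))

lemma aStepJ_eval (xs ys : List Char) (coupe k : Nat) (r1 r2 : Int)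
    (hr1 : r1 = 0 ∨ r1 = 1) (hr2 : r2 = 0 ∨ r2 = 1)
    (ct pt ci pi : List Int) (jd : Nat)
    (h1 : jd + 1 < ct.length) (_h2 : jd + 1 < ci.length) :
    ∃ wv : Int,
      aStepJ xs ys coupe k r1 r2 (mk2 r1 ct pt, mk2 r2 ci pi) (jd + 1)
        = (mk2 r1 (ct.set (jd+1) (vA xs ys k ct pt jd)) pt,
           if coupe ≤ k then mk2 r2 (ci.set (jd+1) wv) pi else mk2 r2 ci pi) ∧
      (vA xs ys k ct pt jd = pt.getD jd 0 + csub (xs.getD k 'A') (ys.getD jd 'A') →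
        wv = pi.getD jd 0) ∧
      (vA xs ys k ct pt jd ≠ pt.getD jd 0 + csub (xs.getD k 'A') (ys.getD jd 'A') →
        vA xs ys k ct pt jd = ct.getD jd 0 + 2 → wv = ci.getD jd 0) ∧
      (vA xs ys k ct pt jd ≠ pt.getD jd 0 + csub (xs.getD k 'A') (ys.getD jd 'A') →
        vA xs ys k ct pt jd ≠ ct.getD jd 0 + 2 → wv = pi.getD (jd+1) 0) := by
  have hne : jd + 1 ≠ jd := by omega
  refine ⟨if vA xs ys k ct pt jd = pt.getD jd 0 + csub (xs.getD k 'A') (ys.getD jd 'A')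
            then pi.getD jd 0
          else if vA xs ys k ct pt jd = ct.getD jd 0 + 2 then ci.getD jd 0
          else pi.getD (jd+1) 0, ?_, ?_, ?_, ?_⟩
  · simp only [aStepJ, cdel, cins, Nat.add_sub_cancel, mod_prev r1 hr1, mod_prev r2 hr2,
      tset_mk2_cur r1 hr1, tset_mk2_cur r2 hr2,
      tget_mk2_cur r1 hr1, tget_mk2_prev r1 hr1, tget_mk2_prev r2 hr2,
      getD_set_self _ _ _ h1, getD_set_ne _ _ _ _ hne, vA]
    split_ifs <;>
      (try simp only [tset_mk2_cur r2 hr2, tget_mk2_cur r2 hr2, tget_mk2_prev r2 hr2,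
        getD_set_ne _ _ _ _ hne, List.set_set]) <;>
      first | rfl | omega
  · intro h; rw [if_pos h]
  · intro h h'; rw [if_neg h, if_pos h']
  · intro h h'; rw [if_neg h, if_neg h']

lemma aInner_spec (xs ys : List Char) (coupe k : Nat) (r1 r2 : Int)
    (hr1 : r1 = 0 ∨ r1 = 1) (hr2 : r2 = 0 ∨ r2 = 1)
    (ct pt ci pi : List Int)
    (hLct : ct.length = ys.length + 1) (hLci : ci.length = ys.length + 1)
    (hpt : ∀ j, j ≤ ys.length → pt.getD j 0 = dT xs ys k j)
    (hct0 : ct.getD 0 0 = dT xs ys (k+1) 0)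
    (hpi : coupe ≤ k → ∀ j, j ≤ ys.length → pi.getD j 0 = cross xs ys coupe k j)
    (hci0 : coupe ≤ k → ci.getD 0 0 = 0) :
    ∀ jd, jd ≤ ys.length →
    ∃ ct' ci',
      (List.range' 1 jd).foldl (aStepJ xs ys coupe k r1 r2) (mk2 r1 ct pt, mk2 r2 ci pi)
        = (mk2 r1 ct' pt, mk2 r2 ci' pi) ∧
      ct'.length = ys.length + 1 ∧ ci'.length = ys.length + 1 ∧
      ct'.getD 0 0 = dT xs ys (k+1) 0 ∧
      (∀ j, 1 ≤ j → j ≤ jd → ct'.getD j 0 = dT xs ys (k+1) j) ∧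
      (coupe ≤ k → ci'.getD 0 0 = 0 ∧
        ∀ j, 1 ≤ j → j ≤ jd → ci'.getD j 0 = cross xs ys coupe (k+1) j) ∧
      (¬ coupe ≤ k → ci' = ci) := by
  intro jd
  induction jd with
  | zero =>
    intro _
    exact ⟨ct, ci, by simp, hLct, hLci, hct0, by intro j h1 h2; omega,
      fun h => ⟨hci0 h, by intro j h1 h2; omega⟩, fun _ => rfl⟩
  | succ jd ih =>
    intro hjd
    obtain ⟨ct', ci', heq, hl1, hl2, h0, hcols, hIc, hInI⟩ := ih (by omega)
    rw [List.range'_concat, List.foldl_append, heq, List.foldl_cons, List.foldl_nil]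
    have h11 : 1 + 1 * jd = jd + 1 := by omega
    rw [h11]
    obtain ⟨wv, heval, hw3, hw2, hw1⟩ :=
      aStepJ_eval xs ys coupe k r1 r2 hr1 hr2 ct' pt ci' pi jd (by omega) (by omega)
    rw [heval]
    have hctjd : ct'.getD jd 0 = dT xs ys (k+1) jd := by
      rcases Nat.eq_zero_or_pos jd with h | h
      · subst h; exact h0
      · exact hcols jd h le_rfl
    have hv : vA xs ys k ct' pt jd = dT xs ys (k+1) (jd+1) := by
      rw [vA, hctjd, hpt (jd+1) (by omega), hpt jd (by omega)]
      conv_rhs => rw [dT]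
    refine ⟨ct'.set (jd+1) (vA xs ys k ct' pt jd),
      if coupe ≤ k then ci'.set (jd+1) wv else ci', ?_, ?_, ?_, ?_, ?_, ?_, ?_⟩
    · by_cases hck : coupe ≤ k <;> simp [hck]
    · simp [hl1]
    · by_cases hck : coupe ≤ k <;> simp [hck, hl2]
    · rw [getD_set_ne _ _ _ _ (by omega)]; exact h0
    · intro j hj1 hj2
      rcases Nat.lt_or_ge j (jd+1) with h | h
      · rw [getD_set_ne _ _ _ _ (by omega)]; exact hcols j hj1 (by omega)
      · have hj : j = jd+1 := by omega
        subst hj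
        rw [getD_set_self _ _ _ (by rw [hl1]; omega), hv]
    · intro hck
      obtain ⟨hc0, hcj⟩ := hIc hck
      have hpijd : pi.getD jd 0 = cross xs ys coupe k jd := hpi hck jd (by omega)
      have hpijd1 : pi.getD (jd+1) 0 = cross xs ys coupe k (jd+1) := hpi hck (jd+1) (by omega)
      have hcijd : ci'.getD jd 0 = cross xs ys coupe (k+1) jd := by
        rcases Nat.eq_zero_or_pos jd with h | h
        · subst h; rw [hc0, cross_zero]
        · exact hcj jd h le_rfl
      rw [if_pos hck]
      constructor
      · rw [getD_set_ne _ _ _ _ (by omega)]; exact hc0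
      · intro j hj1 hj2
        rcases Nat.lt_or_ge j (jd+1) with h | h
        · rw [getD_set_ne _ _ _ _ (by omega)]; exact hcj j hj1 (by omega)
        · have hj : j = jd+1 := by omega
          subst hj
          rw [getD_set_self _ _ _ (by rw [hl2]; omega)]
          -- wv = cross (k+1) (jd+1), by the tie order sub > ins > del
          have hnc : ¬ (k+1 ≤ coupe) := by omega
          rw [cross, dif_neg hnc]
          simp only [Nat.add_sub_cancel]
          by_cases hc3 : dT xs ys (k+1) (jd+1) =
              dT xs ys k jd + csub (xs.getD k 'A') (ys.getD jd 'A')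
          · rw [dif_pos ⟨by omega, hc3⟩]
            rw [hw3 (by rw [hv, hpt jd (by omega)]; exact hc3), hpijd]
          · rw [dif_neg (by intro hh; exact hc3 hh.2)]
            by_cases hc2 : dT xs ys (k+1) (jd+1) = dT xs ys (k+1) jd + 2
            · rw [dif_pos ⟨by omega, hc2⟩]
              rw [hw2 (by rw [hv, hpt jd (by omega)]; exact hc3)
                    (by rw [hv, hctjd]; exact hc2), hcijd]
            · rw [dif_neg (by intro hh; exact hc2 hh.2)]
              rw [hw1 (by rw [hv, hpt jd (by omega)]; exact hc3)
                    (by rw [hv, hctjd]; exact hc2), hpijd1]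
    · intro hnck
      rw [if_neg hnck]
      exact hInI hnck

-- row parities: i1 and i2 as functions of the iteration count
def r1v (k : Nat) : Int := if k % 2 = 0 then 1 else 0
def r2v (coupe k : Nat) : Int := if (k - coupe) % 2 = 0 then 1 else 0

lemma r1v_cases (k : Nat) : r1v k = 0 ∨ r1v k = 1 := by unfold r1v; split_ifs <;> simp

lemma r2v_cases (coupe k : Nat) : r2v coupe k = 0 ∨ r2v coupe k = 1 := by
  unfold r2v; split_ifs <;> simp

lemma tget_pair0 (a b : List Int) (j : Nat) : tget [a, b] 0 j = a.getD j 0 := by simp [tget]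
lemma tget_pair1 (a b : List Int) (j : Nat) : tget [a, b] 1 j = b.getD j 0 := by simp [tget]
lemma tset_pair0 (a b : List Int) (j : Nat) (v : Int) : tset [a, b] 0 j v = [a.set j v, b] := by
  simp [tset]
lemma tset_pair1 (a b : List Int) (j : Nat) (v : Int) : tset [a, b] 1 j v = [a, b.set j v] := by
  simp [tset]

-- invariant of A's while loop before iteration k
def AInv (xs ys : List Char) (coupe k : Nat)
    (st : List (List Int) × List (List Int) × Int × Int) : Prop :=
  ∃ ct pt ci pi : List Int,
    st = (mk2 (r1v k) ct pt, mk2 (r2v coupe k) ci pi, r1v k, r2v coupe k) ∧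
    ct.length = ys.length + 1 ∧ pt.length = ys.length + 1 ∧
    ci.length = ys.length + 1 ∧ pi.length = ys.length + 1 ∧
    (∀ j, j ≤ ys.length → pt.getD j 0 = dT xs ys k j) ∧
    ct.getD 0 0 = dT xs ys (k+1) 0 ∧
    ((k ≤ coupe ∧ (∀ j, j ≤ ys.length → ci.getD j 0 = (j : Int) ∧ pi.getD j 0 = (j : Int)))
     ∨ (coupe < k ∧ (∀ j, j ≤ ys.length → pi.getD j 0 = cross xs ys coupe k j) ∧
        ci.getD 0 0 = 0))

lemma aStep_inv (xs ys : List Char) (coupe k : Nat)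
    (st : List (List Int) × List (List Int) × Int × Int)
    (h : AInv xs ys coupe k st) : AInv xs ys coupe (k+1) (aStep xs ys coupe st k) := by
  obtain ⟨ct, pt, ci, pi, hst, l1, l2, l3, l4, hpt, hct0, hI⟩ := h
  subst hst
  have hr1 := r1v_cases k
  have hr2 := r2v_cases coupe k
  have hpi : coupe ≤ k → ∀ j, j ≤ ys.length → pi.getD j 0 = cross xs ys coupe k j := by
    intro hck j hj
    rcases hI with ⟨hkc, hid⟩ | ⟨hkc, hcr, _⟩
    · have hkk : k = coupe := le_antisymm hkc hck
      subst hkk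
      rw [(hid j hj).2, cross_base _ _ _ _ _ le_rfl]
    · exact hcr j hj
  have hci0 : coupe ≤ k → ci.getD 0 0 = 0 := by
    intro hck
    rcases hI with ⟨hkc, hid⟩ | ⟨_, _, hc0⟩
    · simpa using (hid 0 (by omega)).1
    · exact hc0
  obtain ⟨ct', ci', heq, hl1', hl2', h0', hcols', hIc', hInI'⟩ :=
    aInner_spec xs ys coupe k _ _ hr1 hr2 ct pt ci pi l1 l3 hpt hct0 hpi hci0 ys.length le_rfl
  simp only [aStep, heq]
  have e1 : PySem.Int.mod (r1v k + 1) 2 = r1v (k+1) := by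
    rw [mod_next _ hr1]; unfold r1v; split_ifs <;> omega
  have e2 : (if coupe ≤ k then PySem.Int.mod (r2v coupe k + 1) 2 else r2v coupe k)
      = r2v coupe (k+1) := by
    by_cases hck : coupe ≤ k
    · rw [if_pos hck, mod_next _ hr2]; unfold r2v; split_ifs <;> omega
    · rw [if_neg hck]; unfold r2v; split_ifs <;> omega
  have e3 : PySem.Int.mod (r1v (k+1) - 1) 2 = r1v k := by
    rw [mod_prev _ (r1v_cases (k+1))]; unfold r1v; split_ifs <;> omega
  have e4 : r1v (k+1) = 1 - r1v k := by unfold r1v; split_ifs <;> omega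
  have hval : dT xs ys (k+1) 0 + 2 = dT xs ys (k+2) 0 := by
    rw [dT_zero, dT_zero]; push_cast; ring
  rw [e1, e2, e3]
  rw [tget_mk2_cur _ hr1, h0']
  rw [mk2_swap _ hr1 ct' pt, ← e4, e4, tset_mk2_cur _ (by rw [← e4]; exact r1v_cases (k+1))]
  rw [← e4, hval]
  by_cases hck : coupe ≤ k
  · have e5 : r2v coupe (k+1) = 1 - r2v coupe k := by unfold r2v; split_ifs <;> omega
    obtain ⟨hc0', hcj'⟩ := hIc' hck
    refine ⟨pt.set 0 (dT xs ys (k+2) 0), ct', pi, ci', ?_, by simp [l2], ?_, l4, hl2', ?_, ?_, ?_⟩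
    · rw [mk2_swap _ hr2 ci' pi, ← e5]
    · exact hl1'
    · intro j hj
      rcases Nat.eq_zero_or_pos j with hj0 | hj0
      · subst hj0; exact h0'
      · exact hcols' j hj0 hj
    · rw [getD_set_self _ _ _ (by omega)]
    · refine Or.inr ⟨by omega, ?_, ?_⟩
      · intro j hj
        rcases Nat.eq_zero_or_pos j with hj0 | hj0
        · subst hj0; rw [hc0', cross_zero]
        · exact hcj' j hj0 hj
      · rw [hpi hck 0 (by omega), cross_zero]
  · have e5 : r2v coupe (k+1) = r2v coupe k := by unfold r2v; split_ifs <;> omega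
    have hcieq : ci' = ci := hInI' hck
    rcases hI with ⟨hkc, hid⟩ | ⟨hkc, _, _⟩
    · refine ⟨pt.set 0 (dT xs ys (k+2) 0), ct', ci, pi, ?_, by simp [l2], hl1', l3, l4, ?_, ?_, ?_⟩
      · rw [e5, hcieq]
      · intro j hj
        rcases Nat.eq_zero_or_pos j with hj0 | hj0
        · subst hj0; exact h0'
        · exact hcols' j hj0 hj
      · rw [getD_set_self _ _ _ (by omega)]
      · exact Or.inl ⟨by omega, hid⟩
    · omega

lemma aLoop_inv (xs ys : List Char) (coupe : Nat)
    (st0 : List (List Int) × List (List Int) × Int × Int)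
    (h0 : AInv xs ys coupe 0 st0) :
    ∀ k, AInv xs ys coupe k ((List.range k).foldl (aStep xs ys coupe) st0) := by
  intro k
  induction k with
  | zero => simpa using h0
  | succ k ih =>
    rw [List.range_succ, List.foldl_append, List.foldl_cons, List.foldl_nil]
    exact aStep_inv _ _ _ _ _ ih

lemma initT_spec (L : Nat) : ∀ M, M ≤ L →
    ∃ t0 : List Int,
      (List.range M).foldl (fun T j => tset T 0 j ((j : Int) * cins))
        [List.replicate L (0 : Int), List.replicate L (0 : Int)]
        = [t0, List.replicate L (0 : Int)] ∧
      t0.length = L ∧ (∀ j, j < M → t0.getD j 0 = (j : Int) * 2) := by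
  intro M
  induction M with
  | zero => exact fun _ => ⟨List.replicate L 0, by simp, by simp, by intro j hj; omega⟩
  | succ M ih =>
    intro h
    obtain ⟨t0, heq, hl, hj⟩ := ih (by omega)
    rw [List.range_succ, List.foldl_append, List.foldl_cons, List.foldl_nil, heq, tset_pair0]
    refine ⟨t0.set M ((M : Int) * cins), rfl, by simp [hl], ?_⟩
    intro j hj'
    rcases Nat.lt_or_ge j M with hlt | hge
    · rw [getD_set_ne _ _ _ _ (by omega)]; exact hj j hlt
    · have hjM : j = M := by omega
      subst hjM
      rw [getD_set_self _ _ _ (by omega)]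
      simp [cins]

lemma initI_spec (L : Nat) : ∀ M, M ≤ L →
    ∃ i0 i1 : List Int,
      (List.range M).foldl (fun I j => tset (tset I 0 j (j : Int)) 1 j (j : Int))
        [List.replicate L (0 : Int), List.replicate L (0 : Int)] = [i0, i1] ∧
      i0.length = L ∧ i1.length = L ∧
      (∀ j, j < M → i0.getD j 0 = (j : Int) ∧ i1.getD j 0 = (j : Int)) := by
  intro M
  induction M with
  | zero =>
    exact fun _ => ⟨List.replicate L 0, List.replicate L 0, by simp, by simp, by simp,
      by intro j hj; omega⟩
  | succ M ih =>
    intro h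
    obtain ⟨i0, i1, heq, hl0, hl1, hj⟩ := ih (by omega)
    rw [List.range_succ, List.foldl_append, List.foldl_cons, List.foldl_nil, heq,
      tset_pair0, tset_pair1]
    refine ⟨i0.set M (M : Int), i1.set M (M : Int), rfl, by simp [hl0], by simp [hl1], ?_⟩
    intro j hj'
    rcases Nat.lt_or_ge j M with hlt | hge
    · rw [getD_set_ne _ _ _ _ (by omega), getD_set_ne _ _ _ _ (by omega)]
      exact hj j hlt
    · have hjM : j = M := by omega
      subst hjM
      rw [getD_set_self _ _ _ (by omega), getD_set_self _ _ _ (by omega)]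
      exact ⟨rfl, rfl⟩

lemma dT_row0 (xs ys : List Char) (j : Nat) : dT xs ys 0 j = (j : Int) * 2 := by simp [dT]

-- ===== VERDICT (by name: the statement is the Claim_ definition above) =====
theorem coupure_spec : Claim_equal_coupure := by
  unfold Claim_equal_coupure
  intro x y _
  unfold Spec_coupure
  simp only [coupure, coupure_alt]
  generalize x.toList = xs
  generalize y.toList = ys
  -- initial state of A's loop
  obtain ⟨t0, hTeq, hTl, hTj⟩ := initT_spec (ys.length + 1) (ys.length + 1) le_rfl
  obtain ⟨i0, i1, hIeq, hIl0, hIl1, hIj⟩ := initI_spec (ys.length + 1) (ys.length + 1) le_rfl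
  rw [hTeq, hIeq, tset_pair1]
  -- A's loop invariant at k = xs.length
  have h0 : AInv xs ys (xs.length / 2) 0
      ([t0, (List.replicate (ys.length + 1) (0 : Int)).set 0 cdel], [i0, i1], 1, 1) := by
    have hr1 : r1v 0 = 1 := by unfold r1v; simp
    have hr2 : r2v (xs.length / 2) 0 = 1 := by unfold r2v; simp
    refine ⟨(List.replicate (ys.length + 1) (0 : Int)).set 0 cdel, t0, i1, i0,
      ?_, by simp, hTl, hIl1, hIl0, ?_, ?_, ?_⟩
    · rw [hr1, hr2]; simp [mk2]
    · intro j hj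
      rw [hTj j (by omega), dT_row0]
    · rw [getD_set_self _ _ _ (by simp), dT_zero, cdel]
      norm_num
    · exact Or.inl ⟨by omega, fun j hj => ⟨(hIj j (by omega)).2, (hIj j (by omega)).1⟩⟩
  obtain ⟨ct, pt, ci, pi, hst, c1, c2, c3, c4, hpt, hct0, hIend⟩ :=
    aLoop_inv xs ys (xs.length / 2) _ h0 xs.length
  rw [hst]
  -- B's side equals the preferred crossing column
  rw [tabB_spec xs ys xs.length]
  have ht : ∀ i j, i ≤ xs.length → j ≤ ys.length →
      (((List.range (xs.length + 1)).map (fun i => rowSpec xs ys i)).getD i []).getD j 0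
        = dT xs ys i j := by
    intro i j hi hj
    rw [getD_map_range _ _ _ _ (by omega)]
    unfold rowSpec
    rw [getD_map_range _ _ _ _ (by omega)]
  rw [bBack_eq xs ys (xs.length / 2) xs.length _ ht (xs.length + ys.length) xs.length
    ys.length le_rfl le_rfl le_rfl]
  -- extract the answer from the invariant
  by_cases hz : (xs.length - xs.length / 2) % 2 = 0
  · have hr : r2v (xs.length / 2) xs.length = 1 := by unfold r2v; rw [if_pos hz]
    rw [if_pos hz, hr]
    simp only [mk2, one_ne_zero, if_false, tget_pair0]
    rcases hIend with ⟨hnc, hid⟩ | ⟨_, hcr, _⟩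
    · rw [cross_base _ _ _ _ _ hnc]
      exact (hid ys.length le_rfl).2
    · exact hcr ys.length le_rfl
  · have hr : r2v (xs.length / 2) xs.length = 0 := by unfold r2v; rw [if_neg hz]
    rw [if_neg hz, hr]
    simp only [mk2, if_true, tget_pair1]
    rcases hIend with ⟨hnc, _⟩ | ⟨_, hcr, _⟩
    · omega
    · exact hcr ys.length le_rfl
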